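-- pv_equiv track=rewrite | github.com/jaliagag/issd_jaliaga | 01_trimestre/aed/py/071.py | mascaracteres
-- ===== SOURCE A (Python) =====
-- def mascaracteres(una_lista):
--     palabra = una_lista[0]
--     for i in una_lista:
--         if len(i) > len(palabra):
--             palabra = i
--         elif len(i) == len(palabra):
--             if i > palabra:
--                 palabra = i
--     return palabra
-- ===== SOURCE B (Python) =====
-- def mascaracteres(una_lista):
--     return sorted(una_lista, key=lambda s: (len(s), s))[-1]
-- ===== Notes on version B (the rewrite author's own statement) =====
-- stated objective: simpler
-- what changed: Replaces the explicit running-maximum selection loop (longest, tie-break lexicographically largest) with a stable sort by the key (len(s), s) followed by taking the last element.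
import Mathlib
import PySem

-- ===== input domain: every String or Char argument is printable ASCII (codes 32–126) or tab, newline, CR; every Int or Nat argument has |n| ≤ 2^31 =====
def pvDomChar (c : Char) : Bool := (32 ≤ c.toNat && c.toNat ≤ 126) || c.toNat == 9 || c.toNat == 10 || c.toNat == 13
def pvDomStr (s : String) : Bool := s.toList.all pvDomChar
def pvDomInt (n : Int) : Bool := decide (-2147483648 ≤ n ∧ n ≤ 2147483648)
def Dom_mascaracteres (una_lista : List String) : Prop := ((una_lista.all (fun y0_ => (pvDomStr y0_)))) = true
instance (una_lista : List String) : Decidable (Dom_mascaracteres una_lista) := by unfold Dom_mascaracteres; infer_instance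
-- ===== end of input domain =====

-- B replaces A's running-maximum selection loop by a stable sort on the key (len s, s)
-- followed by taking the last element (objective: simpler).

-- ===== PORT A =====
-- the body of A's for-loop: keep the longer word, on equal length the lexicographically larger
def pvStepA (palabra i : String) : String :=
  if PySem.Str.len i > PySem.Str.len palabra then i
  else if PySem.Str.len i = PySem.Str.len palabra then
    (if palabra < i then i else palabra)
  else palabra

def mascaracteres (una_lista : List String) : String :=
  una_lista.foldl pvStepA (PySem.List.pyGetD una_lista 0 "")

-- ===== PORT B =====
def mascaracteres_alt (una_lista : List String) : String :=
  PySem.List.pyGetD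
    (PySem.List.sorted2 una_lista (fun s => PySem.Str.len s) (fun s => s)) (-1) ""

-- ===== PRECONDITION & SPEC =====
-- Pre_ excludes only the empty list, on which A raises IndexError (una_lista[0]); B raises IndexError there too.
def Pre_mascaracteres (una_lista : List String) : Prop := una_lista ≠ []
instance (una_lista : List String) : Decidable (Pre_mascaracteres una_lista) := by unfold Pre_mascaracteres; infer_instance

def pvWitness_mascaracteres : List String := (["ab", "b", "aa"])

def Spec_mascaracteres (una_lista : List String) (out : String) : Prop := out = mascaracteres_alt una_lista
instance (una_lista : List String) (out : String) : Decidable (Spec_mascaracteres una_lista out) := by unfold Spec_mascaracteres; infer_instance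

-- ===== CLAIM (what is proved, stated in full; the proofs are below) =====
def Claim_equal_mascaracteres : Prop := ∀ (una_lista : List String), Dom_mascaracteres una_lista → Pre_mascaracteres una_lista → Spec_mascaracteres una_lista (mascaracteres una_lista)

-- ===== LEMMAS AND PROOFS =====

-- the sort key (len s, s) as a lexicographically ordered pair
def pvKey (s : String) : Lex (Int × String) := toLex (PySem.Str.len s, s)

theorem pvKey_inj {a b : String} (h : pvKey a = pvKey b) : a = b := by
  have := congrArg (fun x => (ofLex x).2) h
  simpa [pvKey] using this

theorem pvKey_le_iff (a b : String) : pvKey a ≤ pvKey b ↔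
    (PySem.Str.len a < PySem.Str.len b ∨ (PySem.Str.len a = PySem.Str.len b ∧ a ≤ b)) := by
  simp only [pvKey, Prod.Lex.le_iff, ofLex_toLex]

theorem pvKey_lt_iff (a b : String) : pvKey a < pvKey b ↔
    (PySem.Str.len a < PySem.Str.len b ∨ (PySem.Str.len a = PySem.Str.len b ∧ a < b)) := by
  simp only [pvKey, Prod.Lex.lt_iff, ofLex_toLex]

theorem pvStepA_eq_or (p i : String) : pvStepA p i = p ∨ pvStepA p i = i := by
  unfold pvStepA; split_ifs <;> simp

theorem pvStepA_le_left (p i : String) : pvKey p ≤ pvKey (pvStepA p i) := by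
  unfold pvStepA
  split_ifs with h1 h2 h3
  · rw [pvKey_le_iff]; exact Or.inl h1
  · rw [pvKey_le_iff]; exact Or.inr ⟨h2.symm, le_of_lt h3⟩
  · exact le_refl _
  · exact le_refl _

theorem pvStepA_le_right (p i : String) : pvKey i ≤ pvKey (pvStepA p i) := by
  unfold pvStepA
  split_ifs with h1 h2 h3
  · exact le_refl _
  · exact le_refl _
  · rw [pvKey_le_iff]; exact Or.inr ⟨h2, not_lt.mp h3⟩
  · rw [pvKey_le_iff]; exact Or.inl (by omega)

theorem foldA_mem : ∀ (l : List String) (p : String),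
    l.foldl pvStepA p = p ∨ l.foldl pvStepA p ∈ l := by
  intro l
  induction l with
  | nil => intro p; exact Or.inl rfl
  | cons i t ih =>
    intro p
    rcases ih (pvStepA p i) with h | h
    · rcases pvStepA_eq_or p i with h2 | h2
      · exact Or.inl (by rw [List.foldl_cons, h, h2])
      · refine Or.inr ?_
        rw [List.foldl_cons, h, h2]
        exact List.mem_cons_self
    · exact Or.inr (List.mem_cons_of_mem _ (by rw [List.foldl_cons]; exact h))

theorem foldA_ub : ∀ (l : List String) (p y : String), (y = p ∨ y ∈ l) →
    pvKey y ≤ pvKey (l.foldl pvStepA p) := by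
  intro l
  induction l with
  | nil =>
    intro p y hy
    rcases hy with rfl | h
    · exact le_refl _
    · exact absurd h (List.not_mem_nil)
  | cons i t ih =>
    intro p y hy
    rw [List.foldl_cons]
    rcases hy with rfl | hy
    · exact le_trans (pvStepA_le_left y i) (ih _ _ (Or.inl rfl))
    · rcases List.mem_cons.mp hy with rfl | hy
      · exact le_trans (pvStepA_le_right p y) (ih _ _ (Or.inl rfl))
      · exact ih _ _ (Or.inr hy)

-- sorted(xs, key=lambda s: (len(s), s)) is sorting by the lexicographic pair key pvKey
theorem sorted2_eq_sorted_pvKey (l : List String) :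
    PySem.List.sorted2 l (fun s => PySem.Str.len s) (fun s => s) false
      = PySem.List.sorted l pvKey false := by
  show List.foldl _ [] l = List.foldl _ [] l
  congr 1
  funext acc x
  congr 1
  funext a b
  show (decide (PySem.Str.len a < PySem.Str.len b) ||
      (!decide (PySem.Str.len b < PySem.Str.len a) && decide (a < b)))
    = decide (pvKey a < pvKey b)
  have hQ : pvKey a < pvKey b ↔
      (PySem.Str.len a < PySem.Str.len b ∨
        (¬ PySem.Str.len b < PySem.Str.len a ∧ a < b)) := by
    rw [pvKey_lt_iff]
    constructor
    · rintro (h | ⟨h1, h2⟩)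
      · exact Or.inl h
      · exact Or.inr ⟨by omega, h2⟩
    · rintro (h | ⟨h1, h2⟩)
      · exact Or.inl h
      · rcases lt_or_eq_of_le (not_lt.mp h1) with h | h
        · exact Or.inl h
        · exact Or.inr ⟨h, h2⟩
  have hb : (decide (pvKey a < pvKey b)) =
      decide (PySem.Str.len a < PySem.Str.len b ∨
        (¬ PySem.Str.len b < PySem.Str.len a ∧ a < b)) := decide_eq_decide.mpr hQ
  rw [hb]
  by_cases h1 : PySem.Str.len a < PySem.Str.len b <;>
    by_cases h2 : PySem.Str.len b < PySem.Str.len a <;>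
      by_cases h3 : a < b <;> simp [h1, h2, h3, ← decide_not, Nat.not_lt]

-- in a list sorted non-decreasingly, every element is ≤ the last one
theorem le_getLast_of_pairwise {α : Type} {R : α → α → Prop} :
    ∀ (l : List α), l.Pairwise R → ∀ (hne : l ≠ []) (y : α), y ∈ l →
      y = l.getLast hne ∨ R y (l.getLast hne) := by
  intro l
  induction l with
  | nil => intro _ hne; exact absurd rfl hne
  | cons x t ih =>
    intro h hne y hy
    cases t with
    | nil => simp at hy; simp [hy]
    | cons z s =>
      have hne' : z :: s ≠ [] := by simp
      rw [List.getLast_cons hne']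
      rcases List.mem_cons.mp hy with rfl | hy
      · exact Or.inr ((List.pairwise_cons.mp h).1 _ (List.getLast_mem hne'))
      · exact ih (List.pairwise_cons.mp h).2 hne' y hy

-- ===== VERDICT (by name: the statement is the Claim_ definition above) =====
theorem mascaracteres_spec : Claim_equal_mascaracteres := by
  intro l _ hpre
  unfold Spec_mascaracteres mascaracteres mascaracteres_alt
  rw [sorted2_eq_sorted_pvKey]
  have hsne : PySem.List.sorted l pvKey false ≠ [] := by
    intro h; exact hpre ((PySem.List.sorted_eq_nil_iff l pvKey false).mp h)
  rw [PySem.List.pyGetD_neg_one _ _ hsne]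
  have hrBs : (PySem.List.sorted l pvKey false).getLast hsne ∈ PySem.List.sorted l pvKey false :=
    List.getLast_mem hsne
  have hrBl : (PySem.List.sorted l pvKey false).getLast hsne ∈ l :=
    (PySem.List.sorted_perm l pvKey false).mem_iff.mp hrBs
  have hubB : ∀ y ∈ l, pvKey y ≤ pvKey ((PySem.List.sorted l pvKey false).getLast hsne) := by
    intro y hy
    have hys : y ∈ PySem.List.sorted l pvKey false :=
      (PySem.List.sorted_perm l pvKey false).mem_iff.mpr hy
    rcases le_getLast_of_pairwise _ (PySem.List.sorted_pairwise l pvKey) hsne y hys with h | h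
    · rw [h]
    · exact h
  cases l with
  | nil => exact absurd rfl hpre
  | cons x t =>
    rw [PySem.List.pyGetD_zero_cons]
    have hrAl : (x :: t).foldl pvStepA x ∈ x :: t := by
      rcases foldA_mem (x :: t) x with h | h
      · rw [h]; exact List.mem_cons_self
      · exact h
    have hubA : ∀ y ∈ x :: t, pvKey y ≤ pvKey ((x :: t).foldl pvStepA x) :=
      fun y hy => foldA_ub _ _ _ (Or.inr hy)
    exact pvKey_inj (le_antisymm (hubB _ hrAl) (hubA _ hrBl))
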